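-- pv_equiv track=rewrite | github.com/aerjayc/formality | authors/author_to_yelp.py | break_wordset
-- ===== SOURCE A (Python) =====
-- WORDLIM = 21
--
-- def break_wordset(words):
--     """ recursively breaks down words using
--         half_wordset(), which uses commas as breakpoints
--     """
--
--     if len(words) > WORDLIM:
--         if ',' in words:
--             w1, w2 = half_wordset(words)
--             return break_wordset(w1) + break_wordset(w2)
--         else:
--             breakpoint = len(words) >> 1
--             return [words[:breakpoint], words[breakpoint:]]
--     else:
--         return [words]
--
-- def half_wordset(words):
--     # break at the middle (appropriate) punctuation
--     # if none, break at middle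
--     comma_indices = [i for i,word in enumerate(words) if word==',']
--     middle = len(comma_indices)/2
--
--     # argmin_i(middle - i)
--     breakpoint = min(comma_indices, key=lambda x:abs(x-middle))
--
--     words[breakpoint] = '.'
--
--     return [words[:breakpoint+1], words[breakpoint+1:]]
-- ===== SOURCE B (Python) =====
-- WORDLIM = 21
--
-- def break_wordset(words):
--     """ Interval version: recurse over (start, end, dotted_last) index triples of
--         the original list instead of slicing segments, then materialize the leaf
--         slices at the end.  Return value identical to A's; does not mutate the
--         caller's list (A replaces one ',' of it by '.'). """
--     def go(s, e, dotted_last):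
--         if e - s > WORDLIM:
--             commas = [i for i in range(s, e)
--                       if words[i] == ',' and not (dotted_last and i == e - 1)]
--             if commas:
--                 c = len(commas)
--                 mid = c / 2
--                 bp = min(commas, key=lambda x: abs((x - s) - mid))
--                 return go(s, bp + 1, True) + go(bp + 1, e, dotted_last)
--             else:
--                 h = (e - s) >> 1
--                 return [(s, s + h, False), (s + h, e, dotted_last)]
--         else:
--             return [(s, e, dotted_last)]
--
--     def materialize(leaf):
--         s, e, d = leaf
--         seg = words[s:e]
--         if d:
--             seg[-1] = '.'
--         return seg
--
--     return [materialize(leaf) for leaf in go(0, len(words), False)]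
-- ===== Notes on version B (the rewrite author's own statement) =====
-- stated objective: alternative
-- what changed: Instead of recursing on ever-smaller list slices and mutating them, B recurses on (start, end, dotted_last) index intervals of the original list, collecting leaf intervals, and materializes each leaf slice (with its trailing ',' turned into '.') in one final pass; B does not mutate the caller's list.
import Mathlib
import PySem

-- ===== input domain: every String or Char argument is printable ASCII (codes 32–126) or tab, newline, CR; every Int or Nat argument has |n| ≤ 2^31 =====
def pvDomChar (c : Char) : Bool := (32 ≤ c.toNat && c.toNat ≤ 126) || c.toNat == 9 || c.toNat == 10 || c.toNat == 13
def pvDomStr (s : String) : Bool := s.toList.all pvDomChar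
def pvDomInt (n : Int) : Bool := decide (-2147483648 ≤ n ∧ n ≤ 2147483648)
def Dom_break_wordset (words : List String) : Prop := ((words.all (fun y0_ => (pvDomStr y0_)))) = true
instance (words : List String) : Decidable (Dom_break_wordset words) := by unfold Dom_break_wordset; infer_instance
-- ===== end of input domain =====

-- B replaces A's recursion on mutated list slices by a recursion on (start, end, dotted_last)
-- index intervals of the original list, materializing the leaf slices in one final pass
-- (objective: alternative decomposition, same cost).
-- NOTE on side effects: A mutates the caller's list at one index (words[breakpoint]='.');
-- B does not mutate its argument; the theorems here are about the RETURN value only.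

-- ===== PORT A =====
-- middle = len(comma_indices)/2 is a Python float; the key abs(x - middle) of half-integers is
-- exact in float, and comparing |x - c/2| is equivalent to comparing the integer |2x - c|.
def half_wordset (words : List String) : List String × List String :=
  let comma_indices := ((PySem.List.enumerate words).filter (fun p => p.2 == ",")).map Prod.fst
  let c : Int := comma_indices.length
  match PySem.List.min? comma_indices (fun x => (2*x - c).natAbs) with
  | none => ([], [])  -- Python raises ValueError (min of empty); unreachable: only called when ',' ∈ words
  | some b =>
    -- words[breakpoint] = '.' ; exact: 0 ≤ b < len(words) since b is an enumerate index
    let w := words.set b.toNat "."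
    (PySem.List.slice w none (some (b+1)), PySem.List.slice w (some (b+1)) none)

-- measure used only for termination of port A
def pvMeasure (l : List String) : Nat := l.length + l.count ","

lemma half_measure (words : List String) (h : "," ∈ words) :
    pvMeasure (half_wordset words).1 + pvMeasure (half_wordset words).2 + 1
      = pvMeasure words := by
  obtain ⟨k, hk, hwk⟩ := List.mem_iff_getElem.mp h
  have hkci : (k:Int) ∈ ((PySem.List.enumerate words).filter (fun p => p.2 == ",")).map Prod.fst := by
    refine List.mem_map.mpr ⟨((k:Int), ","), ?_, rfl⟩
    refine List.mem_filter.mpr ⟨?_, by simp⟩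
    rw [PySem.List.mem_enumerate_iff]
    exact ⟨k, hk, by simp [hwk]⟩
  cases hmin : PySem.List.min?
      (((PySem.List.enumerate words).filter (fun p => p.2 == ",")).map Prod.fst)
      (fun x => (2*x - ((((PySem.List.enumerate words).filter (fun p => p.2 == ",")).map Prod.fst).length : Int)).natAbs) with
  | none =>
    rw [PySem.List.min?_eq_none_iff] at hmin
    rw [hmin] at hkci; simp at hkci
  | some b =>
    have hbci := PySem.List.min?_mem hmin
    obtain ⟨p, hp, hpb⟩ := List.mem_map.mp hbci
    obtain ⟨j, hj, hpj⟩ := (PySem.List.mem_enumerate_iff _ _ _).mp (List.mem_filter.mp hp).1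
    have hpc : (p.2 == ",") = true := (List.mem_filter.mp hp).2
    have hbj : b = (j:Int) := by rw [← hpb, hpj]; simp
    have hwj : words[j] = "," := by
      have := hpc; rw [hpj] at this; simpa using this
    subst hbj
    simp only [half_wordset, hmin]
    have h1 : ((j:Int)).toNat = j := Int.toNat_natCast j
    have h2 : ((j:Int)) + 1 = ((j+1 : Nat) : Int) := by push_cast; ring
    rw [h1, h2, PySem.List.slice_to_natCast, PySem.List.slice_from_natCast]
    have hset : words.set j "." = words.take j ++ "." :: words.drop (j+1) := by
      rw [List.set_eq_take_append_cons_drop, if_pos hj]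
    have hlt : (words.take j).length = j := List.length_take_of_le (le_of_lt hj)
    have htake : (words.set j ".").take (j+1) = words.take j ++ ["."] := by
      rw [hset, List.take_append]
      simp [hlt]
    have hdrop : (words.set j ".").drop (j+1) = words.drop (j+1) := by
      rw [hset]
      rw [List.drop_append]
      simp [hlt]
    rw [htake, hdrop]
    have hdecomp : words = words.take j ++ words[j] :: words.drop (j+1) := by
      conv_lhs => rw [← List.take_append_drop j words]
      rw [List.drop_eq_getElem_cons hj]
    have hcount : words.count "," = (words.take j).count "," + 1 + (words.drop (j+1)).count "," := by
      conv_lhs => rw [hdecomp]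
      rw [List.count_append, List.count_cons]
      simp [hwj]
      ring
    have hlen : words.length = j + 1 + (words.drop (j+1)).length := by
      simp [List.length_drop]; omega
    simp only [pvMeasure, List.count_append, List.length_append, hlt]
    have : (["."] : List String).count "," = 0 := by decide
    rw [this]
    simp
    omega

lemma half_measure_fst (words : List String) (h : "," ∈ words) :
    pvMeasure (half_wordset words).1 < pvMeasure words := by
  have := half_measure words h; omega

lemma half_measure_snd (words : List String) (h : "," ∈ words) :
    pvMeasure (half_wordset words).2 < pvMeasure words := by
  have := half_measure words h; omega

def break_wordset (words : List String) : List (List String) :=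
  if words.length > 21 then
    if "," ∈ words then
      let p := half_wordset words
      break_wordset p.1 ++ break_wordset p.2
    else
      let breakpoint : Int := (words.length : Int) >>> 1
      [PySem.List.slice words none (some breakpoint),
       PySem.List.slice words (some breakpoint) none]
  else [words]
termination_by pvMeasure words
decreasing_by
  · exact half_measure_fst words (by assumption)
  · exact half_measure_snd words (by assumption)

-- ===== PORT B =====
-- Source B's comma scan: [i for i in range(s, e) if words[i] == ',' and not (dotted_last and i == e-1)];
-- words[i] is in range whenever this is reached (e ≤ len(words)), so getD is exact there.
def bwCommas (words : List String) (s e : Nat) (d : Bool) : List Nat :=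
  (List.range' s (e - s)).filter (fun i => words.getD i "" == "," && !(d && i == e - 1))

-- measure used only for termination of port B's interval recursion
def bwMeasure (words : List String) (s e : Nat) (d : Bool) : Nat :=
  (e - s) + (bwCommas words s e d).length

lemma bwCommas_mem_bounds (words : List String) (s e : Nat) (d : Bool) (bp : Nat)
    (h : bp ∈ bwCommas words s e d) : s ≤ bp ∧ bp < e := by
  have := (List.mem_filter.mp h).1
  rw [List.mem_range'_1] at this
  omega

lemma bwCommas_split (words : List String) (s e : Nat) (d : Bool) (bp : Nat)
    (h : bp ∈ bwCommas words s e d) :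
    bwCommas words s e d
      = bwCommas words s (bp+1) true ++ bp :: bwCommas words (bp+1) e d := by
  have hb : s ≤ bp ∧ bp < e := bwCommas_mem_bounds words s e d bp h
  have hcond : (words.getD bp "" == "," && !(d && bp == e - 1)) = true := (List.mem_filter.mp h).2
  unfold bwCommas
  have hr : List.range' s (e - s) = List.range' s (bp + 1 - s) ++ List.range' (bp+1) (e - (bp+1)) := by
    have h1 : s + (bp + 1 - s) = bp + 1 := by omega
    have h2 : (bp + 1 - s) + (e - (bp+1)) = e - s := by omega
    rw [← h2, ← List.range'_append_1, h1]
  have hr2 : List.range' s (bp + 1 - s) = List.range' s (bp - s) ++ [bp] := by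
    have h1 : s + (bp - s) = bp := by omega
    have h2 : (bp - s) + 1 = bp + 1 - s := by omega
    rw [← h2, ← List.range'_append_1, h1, List.range'_one]
  have hcongr : ∀ i ∈ List.range' s (bp - s),
      (words.getD i "" == "," && !(d && i == e - 1))
        = (words.getD i "" == "," && !(true && i == (bp+1) - 1)) := by
    intro i hi
    rw [List.mem_range'_1] at hi
    have he : (i == e - 1) = false := by simp; omega
    have hbp2 : (i == (bp+1) - 1) = false := by simp; omega
    rw [he, hbp2]
    simp
  have hbig : List.filter (fun i => words.getD i "" == "," && !(d && i == e - 1)) [bp] = [bp] := by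
    simp only [List.filter_cons, List.filter_nil, hcond, if_true]
  have hleft : List.filter (fun i => words.getD i "" == "," && !(true && i == (bp+1) - 1)) [bp] = [] := by
    simp
  rw [hr, hr2, List.filter_append, List.filter_append, List.filter_congr hcongr,
      List.filter_append, hbig, hleft, List.append_nil, List.append_assoc]
  rfl

lemma bwMeasure_left (words : List String) (s e : Nat) (d : Bool) (bp : Nat)
    (h : bp ∈ bwCommas words s e d) :
    bwMeasure words s (bp+1) true < bwMeasure words s e d := by
  have hb := bwCommas_mem_bounds words s e d bp h
  have hs := bwCommas_split words s e d bp h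
  have : (bwCommas words s e d).length
      = (bwCommas words s (bp+1) true).length + 1 + (bwCommas words (bp+1) e d).length := by
    rw [hs]; simp; omega
  unfold bwMeasure; omega

lemma bwMeasure_right (words : List String) (s e : Nat) (d : Bool) (bp : Nat)
    (h : bp ∈ bwCommas words s e d) :
    bwMeasure words (bp+1) e d < bwMeasure words s e d := by
  have hb := bwCommas_mem_bounds words s e d bp h
  have hs := bwCommas_split words s e d bp h
  have : (bwCommas words s e d).length
      = (bwCommas words s (bp+1) true).length + 1 + (bwCommas words (bp+1) e d).length := by
    rw [hs]; simp; omega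
  unfold bwMeasure; omega

-- Source B's go(s, e, dotted_last), returning the leaf triples in order.  As in port A,
-- min(commas, key=lambda x: abs((x-s) - c/2)) compares exact half-integer floats, which is
-- the integer comparison of |2*(x-s) - c|.
def bwB_go (words : List String) (s e : Nat) (d : Bool) : List (Nat × Nat × Bool) :=
  if 21 < e - s then
    match hm : PySem.List.min? (bwCommas words s e d)
        (fun x => (2*((x:Int) - (s:Int)) - ((bwCommas words s e d).length : Int)).natAbs) with
    | some bp => bwB_go words s (bp+1) true ++ bwB_go words (bp+1) e d
    | none =>
      let h2 := (e - s) >>> 1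
      [(s, s+h2, false), (s+h2, e, d)]
  else [(s, e, d)]
termination_by bwMeasure words s e d
decreasing_by
  · exact bwMeasure_left words s e d bp (PySem.List.min?_mem hm)
  · exact bwMeasure_right words s e d bp (PySem.List.min?_mem hm)

-- Source B's materialize: seg = words[s:e]; if d: seg[-1] = '.'.  seg[-1] = '.' is the set at
-- index len(seg)-1; exact since every leaf with flag True has a nonempty interval.
def bwB_mat (words : List String) (leaf : Nat × Nat × Bool) : List String :=
  let seg := PySem.List.slice words (some (leaf.1 : Int)) (some (leaf.2.1 : Int))
  if leaf.2.2 then seg.set (seg.length - 1) "." else seg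

def break_wordset_alt (words : List String) : List (List String) :=
  (bwB_go words 0 words.length false).map (bwB_mat words)

-- ===== PRECONDITION & SPEC =====
def Spec_break_wordset (words : List String) (out : List (List String)) : Prop := out = break_wordset_alt words
instance (words : List String) (out : List (List String)) : Decidable (Spec_break_wordset words out) := by unfold Spec_break_wordset; infer_instance

-- ===== CLAIM =====
def Claim_equal_break_wordset : Prop := ∀ (words : List String), Dom_break_wordset words → Spec_break_wordset words (break_wordset words)

-- ===== LEMMAS AND PROOFS =====

lemma mat_length (words : List String) (s e : Nat) (d : Bool) (h2 : e ≤ words.length) :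
    (bwB_mat words (s, e, d)).length = e - s := by
  simp [bwB_mat, pysem]
  split <;> simp <;> omega

lemma mat_getD (words : List String) (s e : Nat) (d : Bool) (h2 : e ≤ words.length)
    (j : Nat) (hj : j < e - s) :
    (bwB_mat words (s, e, d)).getD j ""
      = if d = true ∧ j = e - s - 1 then "." else words.getD (s+j) "" := by
  have hlen := mat_length words s e d h2
  have hjl : j < (bwB_mat words (s, e, d)).length := by omega
  have hsw : s + j < words.length := by omega
  rw [List.getD_eq_getElem _ _ hjl, List.getD_eq_getElem _ _ hsw]
  cases d with
  | false =>
    simp [bwB_mat, pysem, List.getElem_take, List.getElem_drop]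
  | true =>
    simp [bwB_mat, pysem, List.getElem_set, List.getElem_take, List.getElem_drop]
    split_ifs <;> simp_all <;> omega

lemma matGetD_comma_iff (words : List String) (s e : Nat) (d : Bool) (h2 : e ≤ words.length)
    (j : Nat) (hj : j < e - s) :
    ((bwB_mat words (s, e, d)).getD j "" = ",")
      ↔ (words.getD (s+j) "" == "," && !(d && (s+j) == e - 1)) = true := by
  rw [mat_getD words s e d h2 j hj]
  have : (s + j = e - 1) ↔ (j = e - s - 1) := by omega
  split_ifs with hd
  · simp [hd]
    exact fun _ => by omega
  · rcases d with _ | _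
    · simp
    · simp at hd
      simp [this, hd]

lemma mem_comma_iff (words : List String) (s e : Nat) (d : Bool) (h2 : e ≤ words.length) :
    ("," ∈ bwB_mat words (s, e, d)) ↔ bwCommas words s e d ≠ [] := by
  rw [List.mem_iff_getElem]
  constructor
  · rintro ⟨j, hjl, hjv⟩
    have hj : j < e - s := by rw [mat_length words s e d h2] at hjl; exact hjl
    have := (matGetD_comma_iff words s e d h2 j hj).mp
      (by rw [List.getD_eq_getElem _ _ hjl]; exact hjv)
    intro hnil
    have hmem : (s + j) ∈ bwCommas words s e d := by
      unfold bwCommas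
      refine List.mem_filter.mpr ⟨?_, this⟩
      rw [List.mem_range'_1]; omega
    rw [hnil] at hmem; simp at hmem
  · intro hnil
    obtain ⟨i, hi⟩ := List.exists_mem_of_ne_nil _ hnil
    have hir := (List.mem_filter.mp hi).1
    rw [List.mem_range'_1] at hir
    have hcond := (List.mem_filter.mp hi).2
    have hj : i - s < e - s := by omega
    have hji : s + (i - s) = i := by omega
    refine ⟨i - s, by rw [mat_length words s e d h2]; omega, ?_⟩
    have := (matGetD_comma_iff words s e d h2 (i-s) hj).mpr (by rw [hji]; exact hcond)
    rw [List.getD_eq_getElem] at this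
    exact this

lemma enum_filter_comma (l : List String) (k : Int) :
    ((PySem.List.enumerate l k).filter (fun p => p.2 == ",")).map Prod.fst
      = ((List.range l.length).filter (fun j => l.getD j "" == ",")).map (fun (j : Nat) => k + (j:Int)) := by
  induction l generalizing k with
  | nil => simp [PySem.List.enumerate]
  | cons x t ih =>
    rw [PySem.List.enumerate]
    have hr : List.range (x::t).length = 0 :: (List.range t.length).map Nat.succ := by
      simp [List.range_succ_eq_map]
    rw [hr, List.filter_cons, List.filter_cons]
    have htail : ((List.range t.length).map Nat.succ).filter (fun j => (x::t).getD j "" == ",")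
        = ((List.range t.length).filter (fun j => t.getD j "" == ",")).map Nat.succ := by
      rw [List.filter_map]
      congr 1
    have hmapeq : ∀ jl : List Nat,
        (jl.map Nat.succ).map (fun (j : Nat) => k + (j:Int)) = jl.map (fun (j : Nat) => (k+1) + (j:Int)) := by
      intro jl; rw [List.map_map]; apply List.map_congr_left; intro j _
      simp [Nat.succ_eq_add_one]; ring
    by_cases hx : (x == ",") = true
    · simp only [hx, List.getD_cons_zero, if_true]
      simp only [List.map_cons, htail, hmapeq, ih (k+1)]
      simp
    · have hx' : ((x::t).getD 0 "" == ",") = false := by simpa using hx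
      simp only [hx, hx', Bool.false_eq_true, if_false]
      simp only [htail, hmapeq, ih (k+1)]

lemma min?_congr {α : Type} (k1 k2 : α → Nat) (l : List α)
    (h : ∀ x ∈ l, k1 x = k2 x) :
    PySem.List.min? l k1 = PySem.List.min? l k2 := by
  suffices H : ∀ (l' : List α) (acc : Option α), (∀ x ∈ l', k1 x = k2 x) →
      (∀ m, acc = some m → k1 m = k2 m) →
      List.foldl (fun acc x => match acc with
        | none => some x
        | some m => if k1 x < k1 m then some x else some m) acc l'
      = List.foldl (fun acc x => match acc with
        | none => some x
        | some m => if k2 x < k2 m then some x else some m) acc l' by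
    unfold PySem.List.min?
    exact H l none h (by simp)
  intro l'
  induction l' with
  | nil => intro acc _ _; simp
  | cons x t ih =>
    intro acc hl hacc
    have hx := hl x (by simp)
    have ht : ∀ y ∈ t, k1 y = k2 y := fun y hy => hl y (by simp [hy])
    rw [List.foldl_cons, List.foldl_cons]
    cases acc with
    | none =>
      exact ih (some x) ht (by intro m hm; rw [Option.some_inj] at hm; subst hm; exact hx)
    | some m =>
      have hm := hacc m rfl
      simp only [hx, hm]
      by_cases hcmp : k2 x < k2 m
      · rw [if_pos hcmp]
        exact ih (some x) ht (by intro m' hm'; rw [Option.some_inj] at hm'; subst hm'; exact hx)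
      · rw [if_neg hcmp]
        exact ih (some m) ht (by intro m' hm'; rw [Option.some_inj] at hm'; subst hm'; exact hm)

lemma min?_map {α β : Type} (f : α → β) (key : β → Nat) (l : List α) :
    PySem.List.min? (l.map f) key = Option.map f (PySem.List.min? l (fun a => key (f a))) := by
  unfold PySem.List.min?
  suffices H : ∀ acc : Option α,
      List.foldl (fun acc x => match acc with
        | none => some x
        | some m => if key x < key m then some x else some m) (Option.map f acc) (l.map f)
      = Option.map f (List.foldl (fun acc x => match acc with
        | none => some x
        | some m => if key (f x) < key (f m) then some x else some m) acc l) by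
    exact H none
  induction l with
  | nil => intro acc; simp
  | cons x t ih =>
    intro acc
    cases acc with
    | none => simpa using ih (some x)
    | some m =>
      simp only [List.map_cons, List.foldl_cons, Option.map_some]
      by_cases hk : key (f x) < key (f m)
      · rw [if_pos hk, if_pos hk]; exact ih (some x)
      · rw [if_neg hk, if_neg hk]; exact ih (some m)

lemma commaIdx_eq (words : List String) (s e : Nat) (d : Bool) (h2 : e ≤ words.length) :
    ((PySem.List.enumerate (bwB_mat words (s, e, d))).filter (fun p => p.2 == ",")).map Prod.fst
      = (bwCommas words s e d).map (fun i => ((i - s : Nat) : Int)) := by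
  rw [enum_filter_comma (bwB_mat words (s, e, d)) 0, mat_length words s e d h2]
  have hflt : (List.range (e - s)).filter (fun j => (bwB_mat words (s, e, d)).getD j "" == ",")
      = (List.range (e - s)).filter
          (fun j => words.getD (s+j) "" == "," && !(d && (s+j) == e - 1)) := by
    apply List.filter_congr
    intro j hj
    rw [List.mem_range] at hj
    have := matGetD_comma_iff words s e d h2 j hj
    rcases hb : ((bwB_mat words (s, e, d)).getD j "" == ",") with _ | _
    · rcases hc : (words.getD (s+j) "" == "," && !(d && (s+j) == e - 1)) with _ | _
      · rfl
      · exfalso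
        have := this.mpr hc
        simp at hb
        exact hb this
    · symm
      exact this.mp (by simpa using hb)
  rw [hflt]
  unfold bwCommas
  rw [List.range'_eq_map_range, List.filter_map, List.map_map]
  have hsame : (List.filter ((fun i => words.getD i "" == "," && !(d && i == e - 1)) ∘
        fun x => s + x) (List.range (e-s)))
      = (List.filter (fun j => words.getD (s+j) "" == "," && !(d && (s+j) == e - 1))
          (List.range (e-s))) := rfl
  rw [hsame]
  apply List.map_congr_left
  intro j hj
  rw [List.mem_filter, List.mem_range] at hj
  simp [Function.comp]

lemma half_eq (words : List String) (s e : Nat) (d : Bool) (h2 : e ≤ words.length) (bp : Nat)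
    (hm : PySem.List.min? (bwCommas words s e d)
        (fun x => (2*((x:Int) - (s:Int)) - ((bwCommas words s e d).length : Int)).natAbs) = some bp) :
    half_wordset (bwB_mat words (s, e, d))
      = (bwB_mat words (s, bp+1, true), bwB_mat words (bp+1, e, d)) := by
  have hbpmem := PySem.List.min?_mem hm
  obtain ⟨hsb, hbe⟩ := bwCommas_mem_bounds words s e d bp hbpmem
  have hcond := (List.mem_filter.mp hbpmem).2
  have hnd : ¬(d = true ∧ bp = e - 1) := by
    rintro ⟨hd, hb⟩
    rw [hd, hb] at hcond
    simp at hcond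
  have hkey : ∀ i ∈ bwCommas words s e d,
      ((fun x => (2*x - (((bwCommas words s e d).map (fun i => ((i - s : Nat) : Int))).length : Int)).natAbs)
        ((fun i => ((i - s : Nat) : Int)) i))
      = (fun x => (2*((x:Int) - (s:Int)) - ((bwCommas words s e d).length : Int)).natAbs) i := by
    intro i hi
    obtain ⟨hsi, hie⟩ := bwCommas_mem_bounds words s e d i hi
    simp only [List.length_map]
    congr 1
    have : ((i - s : Nat) : Int) = (i : Int) - (s : Int) := by omega
    rw [this]
  have hsc : PySem.List.min?
      ((bwCommas words s e d).map (fun i => ((i - s : Nat) : Int)))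
      (fun x => (2*x - (((bwCommas words s e d).map (fun i => ((i - s : Nat) : Int))).length : Int)).natAbs)
      = some ((bp - s : Nat) : Int) := by
    rw [min?_map, min?_congr _ _ _ hkey, hm]
    rfl
  unfold half_wordset
  rw [commaIdx_eq words s e d h2]
  simp only [hsc]
  have htn : (((bp - s : Nat) : Int)).toNat = bp - s := Int.toNat_natCast _
  have hp1 : ((bp - s : Nat) : Int) + 1 = ((bp - s + 1 : Nat) : Int) := by push_cast; ring
  rw [htn, hp1, PySem.List.slice_to_natCast, PySem.List.slice_from_natCast]
  have hlen := mat_length words s e d h2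
  have hsegget : ∀ (t : Nat) (h : t < (bwB_mat words (s,e,d)).length),
      (bwB_mat words (s,e,d))[t]
        = if d = true ∧ t = e - s - 1 then "." else words.getD (s+t) "" := by
    intro t h
    rw [← List.getD_eq_getElem _ "" h, mat_getD words s e d h2 t (by omega)]
  rw [Prod.mk.injEq]
  refine ⟨?_, ?_⟩
  · -- left half
    apply List.ext_getElem
    · rw [List.length_take, List.length_set, hlen, mat_length words s (bp+1) true (by omega)]
      omega
    · intro t ht1 ht2
      have htb : t < bp - s + 1 := by
        rw [List.length_take, List.length_set, hlen] at ht1; omega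
      rw [List.getElem_take, List.getElem_set]
      have hrhs : (bwB_mat words (s, bp+1, true))[t]
          = if t = bp - s then "." else words.getD (s+t) "" := by
        have h' : t < (bp+1) - s := by omega
        rw [← List.getD_eq_getElem _ "" ht2, mat_getD words s (bp+1) true (by omega) t h']
        simp only [true_and]
        congr 1
        · simp
          omega
      rw [hrhs, hsegget t (by omega)]
      by_cases hteq : t = bp - s
      · simp [hteq]
      · rw [if_neg (by omega), if_neg hteq, if_neg (by rintro ⟨hd, hts⟩; exact hnd ⟨hd, by omega⟩)]
  · -- right half
    apply List.ext_getElem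
    · rw [List.length_drop, List.length_set, hlen, mat_length words (bp+1) e d (by omega)]
      omega
    · intro t ht1 ht2
      have htb : t < e - (bp+1) := by
        rw [List.length_drop, List.length_set, hlen] at ht1; omega
      rw [List.getElem_drop, List.getElem_set]
      rw [if_neg (by omega), hsegget (bp - s + 1 + t) (by omega)]
      have hrhs : (bwB_mat words (bp+1, e, d))[t]
          = if d = true ∧ t = e - (bp+1) - 1 then "." else words.getD (bp+1+t) "" := by
        rw [← List.getD_eq_getElem _ "" ht2, mat_getD words (bp+1) e d h2 t htb]
      rw [hrhs]
      have hidx : s + (bp - s + 1 + t) = bp + 1 + t := by omega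
      rw [hidx]
      by_cases hdt : d = true ∧ t = e - (bp+1) - 1
      · rw [if_pos hdt, if_pos ⟨hdt.1, by omega⟩]
      · rw [if_neg hdt, if_neg (by rintro ⟨hd, hts⟩; exact hdt ⟨hd, by omega⟩)]

lemma bw_small (seg : List String) (h : seg.length ≤ 21) :
    break_wordset seg = [seg] := by
  rw [break_wordset, if_neg (by omega)]

lemma bw_comma (seg : List String) (h1 : 21 < seg.length) (h2 : "," ∈ seg) :
    break_wordset seg
      = break_wordset (half_wordset seg).1 ++ break_wordset (half_wordset seg).2 := by
  rw [break_wordset, if_pos h1, if_pos h2]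

lemma bw_nocomma (seg : List String) (h1 : 21 < seg.length) (h2 : "," ∉ seg) :
    break_wordset seg
      = [PySem.List.slice seg none (some ((seg.length : Int) >>> 1)),
         PySem.List.slice seg (some ((seg.length : Int) >>> 1)) none] := by
  rw [break_wordset, if_pos h1, if_neg h2]

lemma go_spec (words : List String) (s e : Nat) (d : Bool) :
    s ≤ e → e ≤ words.length →
    break_wordset (bwB_mat words (s, e, d)) = (bwB_go words s e d).map (bwB_mat words) := by
  fun_induction bwB_go words s e d with
  | case1 s e d hgt bp hm ih1 ih2 =>
    intro h1 h2
    have hbpmem := PySem.List.min?_mem hm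
    obtain ⟨hsb, hbe⟩ := bwCommas_mem_bounds words s e d bp hbpmem
    rw [bw_comma _ (by rw [mat_length words s e d h2]; omega)
          ((mem_comma_iff words s e d h2).mpr (List.ne_nil_of_mem hbpmem)),
        half_eq words s e d h2 bp hm, List.map_append,
        ih1 (by omega) (by omega), ih2 (by omega) h2]
  | case2 s e d hgt hm =>
    intro h1 h2
    have hnil : bwCommas words s e d = [] := (PySem.List.min?_eq_none_iff _ _).mp hm
    have hnc : "," ∉ bwB_mat words (s, e, d) := by
      rw [mem_comma_iff words s e d h2]
      simp [hnil]
    have hlen := mat_length words s e d h2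
    rw [bw_nocomma _ (by omega) hnc]
    have hcast : ((bwB_mat words (s, e, d)).length : Int) >>> 1
        = (((e - s) >>> 1 : Nat) : Int) := by
      rw [hlen]
      exact Int.mem_toNat?.mp rfl
    rw [hcast, PySem.List.slice_to_natCast, PySem.List.slice_from_natCast]
    have hk : (e - s) >>> 1 = (e - s) / 2 := by
      rw [Nat.shiftRight_eq_div_pow]
    have hsegget : ∀ (t : Nat) (h : t < (bwB_mat words (s,e,d)).length),
        (bwB_mat words (s,e,d))[t]
          = if d = true ∧ t = e - s - 1 then "." else words.getD (s+t) "" := by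
      intro t h
      rw [← List.getD_eq_getElem _ "" h, mat_getD words s e d h2 t (by omega)]
    have hL : (bwB_mat words (s, e, d)).take ((e - s) >>> 1)
        = bwB_mat words (s, s + (e - s) >>> 1, false) := by
      apply List.ext_getElem
      · rw [List.length_take, hlen, mat_length words s (s + (e - s) >>> 1) false (by omega)]
        omega
      · intro t ht1 ht2
        have htb : t < (e - s) >>> 1 := by
          rw [List.length_take, hlen] at ht1; omega
        rw [List.getElem_take, hsegget t (by omega),
            ← List.getD_eq_getElem _ "" ht2,
            mat_getD words s (s + (e - s) >>> 1) false (by omega) t (by omega)]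
        rw [if_neg (by rintro ⟨hd, hts⟩; omega), if_neg (by simp)]
    have hR : (bwB_mat words (s, e, d)).drop ((e - s) >>> 1)
        = bwB_mat words (s + (e - s) >>> 1, e, d) := by
      apply List.ext_getElem
      · rw [List.length_drop, hlen, mat_length words (s + (e - s) >>> 1) e d (by omega)]
        omega
      · intro t ht1 ht2
        have htb : t < e - (s + (e - s) >>> 1) := by
          rw [List.length_drop, hlen] at ht1; omega
        rw [List.getElem_drop, hsegget ((e - s) >>> 1 + t) (by omega),
            ← List.getD_eq_getElem _ "" ht2,
            mat_getD words (s + (e - s) >>> 1) e d h2 t htb]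
        have hidx : s + ((e - s) >>> 1 + t) = s + (e - s) >>> 1 + t := by omega
        rw [hidx]
        by_cases hdt : d = true ∧ t = e - (s + (e - s) >>> 1) - 1
        · rw [if_pos ⟨hdt.1, by omega⟩, if_pos hdt]
        · rw [if_neg (by rintro ⟨hd, hts⟩; exact hdt ⟨hd, by omega⟩), if_neg hdt]
    rw [hL, hR]
    simp
    exact ⟨rfl, rfl⟩
  | case3 s e d hgt =>
    intro h1 h2
    rw [bw_small _ (by rw [mat_length words s e d h2]; omega)]
    simp

-- ===== VERDICT =====
theorem break_wordset_spec : Claim_equal_break_wordset := by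
  intro words _
  unfold Spec_break_wordset break_wordset_alt
  rw [← go_spec words 0 words.length false (Nat.zero_le _) (le_refl _)]
  have : bwB_mat words (0, words.length, false) = words := by
    simp [bwB_mat, pysem]
  rw [this]
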